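-- pv_equiv track=rewrite | github.com/shivamkumar7878/Code-Signal-Languge | Intro/Eruption Of Light/isBeautifulString.py | isBeautifulString
-- ===== SOURCE A (Python) =====
-- from collections import Counter
-- import string
--
-- def isBeautifulString(inputString):
--     c=Counter(inputString)
--     ans=[]
--
--     for k,v in sorted([(i,j) for i,j in c.items()]):
--         ans.extend([all([x<=v for k1,x in c.items() if k1>k])])
--         if k not in (set(string.ascii_lowercase[0:len(c.values())])):
--             return False
--     return all(ans)
-- ===== SOURCE B (Python) =====
-- from collections import Counter
-- import string
--
-- def isBeautifulString(inputString):
--     counts = Counter(inputString)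
--     alphabet = string.ascii_lowercase[:len(counts)]
--     if sorted(counts) != list(alphabet):
--         return False
--     vals = [counts[ch] for ch in alphabet]
--     return all(b <= a for a, b in zip(vals, vals[1:]))
-- ===== Notes on version B (the rewrite author's own statement) =====
-- stated objective: simpler
-- what changed: A runs its alphabet-membership test inside a loop that, for each key, rescans all counter items for every greater key (an all-pairs non-increasing test); B checks once that the sorted distinct characters equal the first-n lowercase letters and then does a single adjacent-comparison sweep over their counts.
import Mathlib
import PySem

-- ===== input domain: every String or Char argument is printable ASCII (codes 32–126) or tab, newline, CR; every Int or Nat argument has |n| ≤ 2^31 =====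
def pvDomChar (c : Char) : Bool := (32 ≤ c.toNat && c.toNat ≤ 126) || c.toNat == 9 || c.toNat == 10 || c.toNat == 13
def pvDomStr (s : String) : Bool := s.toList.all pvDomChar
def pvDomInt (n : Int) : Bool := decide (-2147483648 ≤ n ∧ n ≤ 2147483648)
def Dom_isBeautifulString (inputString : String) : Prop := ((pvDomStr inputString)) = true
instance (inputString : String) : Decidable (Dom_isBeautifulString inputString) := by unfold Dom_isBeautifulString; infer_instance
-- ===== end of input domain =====

-- B replaces A's all-pairs non-increasing test with a sorted-keys equality check and one adjacent-comparison pass; objective: simpler.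

-- ===== PORT A =====
-- string.ascii_lowercase
def pvAsciiLower : List Char := "abcdefghijklmnopqrstuvwxyz".toList

-- the 'for k,v in sorted(...)' loop of A, with its 'ans' accumulator and early 'return False'
def pvLoopA (items : List (Char × Int)) (aset : PySem.Set Char) :
    List (Char × Int) → List Bool → Bool
  | [], ans => ans.all id
  | (k, v) :: rest, ans =>
      let ans' := ans ++ [((items.filter (fun q => decide (k < q.1))).map (fun q => decide (q.2 ≤ v))).all id]
      if k ∈ aset then pvLoopA items aset rest ans' else false

def isBeautifulString (inputString : String) : Bool :=
  let c := PySem.Dict.counter inputString.toList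
  pvLoopA c.items
    (PySem.Set.ofList (PySem.List.slice pvAsciiLower none (some (c.values.length : Int))))
    (PySem.List.sorted2 c.items (fun p => p.1) (fun p => p.2)) []

-- ===== PORT B =====
def isBeautifulString_alt (inputString : String) : Bool :=
  let counts := PySem.Dict.counter inputString.toList
  let alphabet := PySem.List.slice pvAsciiLower none (some (counts.size : Int))
  if PySem.List.sorted counts.keys (fun x => x) = alphabet then
    let vals := alphabet.map (fun ch => counts.getD ch 0)
    (vals.zip (PySem.List.slice vals (some 1) none)).all (fun p => decide (p.2 ≤ p.1))
  else false

-- ===== PRECONDITION & SPEC =====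
def Spec_isBeautifulString (inputString : String) (out : Bool) : Prop := out = isBeautifulString_alt inputString
instance (inputString : String) (out : Bool) : Decidable (Spec_isBeautifulString inputString out) := by unfold Spec_isBeautifulString; infer_instance

-- ===== CLAIM (what is proved, stated in full; the proofs are below) =====
def Claim_equal_isBeautifulString : Prop := ∀ (inputString : String), Dom_isBeautifulString inputString → Spec_isBeautifulString inputString (isBeautifulString inputString)

-- ===== LEMMAS AND PROOFS =====

-- A's loop equals: every key in the set, and every recorded check true
theorem pvLoopA_eq (items : List (Char × Int)) (aset : PySem.Set Char)
    (ps : List (Char × Int)) (ans : List Bool) :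
    pvLoopA items aset ps ans =
      (ps.all (fun p => decide (p.1 ∈ aset)) && (ans.all id &&
        ps.all (fun p =>
          ((items.filter (fun q => decide (p.1 < q.1))).map (fun q => decide (q.2 ≤ p.2))).all id))) := by
  induction ps generalizing ans with
  | nil => simp [pvLoopA]
  | cons p rest ih =>
    obtain ⟨k, v⟩ := p
    simp only [pvLoopA]
    by_cases h : k ∈ aset
    · rw [if_pos h, ih]
      simp [h, List.all_append, Bool.and_assoc, Bool.and_comm, Bool.and_left_comm]
    · rw [if_neg h]
      simp [h]

-- adjacent non-increasing along a strictly increasing list ↔ all-pairs non-increasing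
theorem pvAdjAll (cnt : Char → Int) :
    ∀ K : List Char, K.Pairwise (· < ·) →
      ((((K.map cnt).zip ((K.map cnt).tail)).all (fun p => decide (p.2 ≤ p.1)) = true) ↔
        ∀ a ∈ K, ∀ b ∈ K, a < b → cnt b ≤ cnt a)
  | [], _ => by simp
  | [x], _ => by
      simp only [List.map_cons, List.map_nil, List.tail_cons, List.zip_nil_right,
        List.all_nil, List.mem_singleton]
      constructor
      · rintro _ a rfl b rfl hab; exact absurd hab (lt_irrefl _)
      · intro _; trivial
  | x :: y :: u, hK => by
      have hyu : (y :: u).Pairwise (· < ·) := hK.of_cons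
      have hx : ∀ b ∈ y :: u, x < b := by
        intro b hb; exact (List.pairwise_cons.mp hK).1 b hb
      have ih := pvAdjAll cnt (y :: u) hyu
      simp only [List.map_cons, List.tail_cons, List.zip_cons_cons, List.all_cons,
        Bool.and_eq_true, decide_eq_true_eq] at ih ⊢
      rw [ih]
      constructor
      · rintro ⟨hxy, hrest⟩ a ha b hb hab
        rcases List.mem_cons.mp ha with rfl | ha'
        · rcases List.mem_cons.mp hb with rfl | hb'
          · exact absurd hab (lt_irrefl _)
          · rcases List.mem_cons.mp hb' with rfl | hb''
            · exact hxy
            · have hyb : y < b := (List.pairwise_cons.mp hyu).1 b hb''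
              exact le_trans (hrest y (List.mem_cons_self) b hb' hyb) hxy
        · rcases List.mem_cons.mp hb with rfl | hb'
          · exact absurd (lt_trans hab (hx a ha')) (lt_irrefl _)
          · exact hrest a ha' b hb' hab
      · intro h
        refine ⟨h x (List.mem_cons_self) y (by simp) (hx y (by simp)), ?_⟩
        intro a ha b hb hab
        exact h a (List.mem_cons_of_mem _ ha) b (List.mem_cons_of_mem _ hb) hab

-- containment in a strictly increasing list of at most the same length ↔ sorted keys equal it
theorem pvKeysEq (S alphabet : List Char) (hS : S.Nodup)
    (halpha : alphabet.Pairwise (· < ·)) (hlen : alphabet.length ≤ S.length) :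
    ((∀ k ∈ S, k ∈ alphabet) ↔ PySem.List.sorted S (fun x => x) = alphabet) := by
  constructor
  · intro h
    have hsp : S.Subperm alphabet := List.subperm_of_subset hS (fun x hx => h x hx)
    have hperm : alphabet.Perm S := (hsp.perm_of_length_le hlen).symm
    exact PySem.List.sorted_eq_of_perm_of_pairwise_lt S alphabet _ hperm halpha
  · intro h k hk
    rw [← h]
    exact (PySem.List.mem_sorted S (fun x => x) false k).mpr hk

theorem pvAsciiLower_pairwise : pvAsciiLower.Pairwise (· < ·) := by decide

-- the main equivalence, pointwise
theorem pvMain (s : String) : isBeautifulString s = isBeautifulString_alt s := by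
  simp only [isBeautifulString, isBeautifulString_alt]
  set l := s.toList with hldef
  set S := PySem.Set.ofList l with hSdef
  set cnt : Char → Int := fun k => (l.count k : Int) with hcnt
  have hitems : (PySem.Dict.counter l).items = S.map (fun k => (k, cnt k)) :=
    PySem.Dict.items_counter l
  have hkeys : (PySem.Dict.counter l).keys = S := by
    show ((PySem.Dict.counter l).items.map (·.1)) = S
    rw [hitems]; simp [Function.comp_def]
  have hvlen : ((PySem.Dict.counter l).values.length : Int) = (S.length : Int) := by
    show (((PySem.Dict.counter l).items.map (·.2)).length : Int) = _
    rw [hitems]; simp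
  have hsize : ((PySem.Dict.counter l).size : Int) = (S.length : Int) := by
    show (((PySem.Dict.counter l).items.length : Nat) : Int) = _
    rw [hitems]; simp
  rw [hitems, hkeys, hvlen, hsize, PySem.List.slice_to_natCast]
  set n := S.length with hn
  set alphabet := pvAsciiLower.take n with halphadef
  have halpha : alphabet.Pairwise (· < ·) :=
    List.Pairwise.sublist (List.take_sublist n pvAsciiLower) pvAsciiLower_pairwise
  have hlen : alphabet.length ≤ n := by
    rw [halphadef, List.length_take]; omega
  have hnodS : S.Nodup := PySem.Set.nodup_ofList l
  set items := S.map (fun k => (k, cnt k)) with hitemsdef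
  rw [pvLoopA_eq,
    List.Perm.all_eq (PySem.List.sorted2_perm items (fun p => p.1) (fun p => p.2) false),
    List.Perm.all_eq (PySem.List.sorted2_perm items (fun p => p.1) (fun p => p.2) false)]
  have hmemAll : (items.all (fun p => decide (p.1 ∈ PySem.Set.ofList alphabet)) = true) ↔
      ∀ k ∈ S, k ∈ alphabet := by
    simp [hitemsdef, List.all_eq_true, PySem.Set.mem_ofList]
  have hchkAll : (items.all (fun p =>
      ((items.filter (fun q => decide (p.1 < q.1))).map (fun q => decide (q.2 ≤ p.2))).all id) = true) ↔
      ∀ a ∈ S, ∀ b ∈ S, a < b → cnt b ≤ cnt a := by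
    simp [hitemsdef, List.all_eq_true, List.all_map]
    constructor
    · intro h a ha b hb hab
      rcases h a ha b hb with h' | h'
      · exact absurd hab (not_lt.mpr h')
      · exact h'
    · intro h a ha b hb
      by_cases hab : a < b
      · exact Or.inr (h a ha b hb hab)
      · exact Or.inl (not_lt.mp hab)
  have hvals : alphabet.map (fun ch => (PySem.Dict.counter l).getD ch 0) = alphabet.map cnt := by
    refine List.map_congr_left (fun ch _ => ?_)
    rw [PySem.Dict.getD_counter]
  by_cases hKA : PySem.List.sorted S (fun x => x) = alphabet
  · rw [if_pos hKA]
    have hmem : ∀ k ∈ S, k ∈ alphabet := (pvKeysEq S alphabet hnodS halpha hlen).mpr hKA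
    rw [hmemAll.mpr hmem]
    have hperm : alphabet.Perm S := hKA ▸ PySem.List.sorted_perm S (fun x => x) false
    have hadj := pvAdjAll cnt alphabet halpha
    rw [hvals, PySem.List.slice_from_one]
    rw [Bool.eq_iff_iff]
    simp only [Bool.true_and, List.all_nil]
    rw [hchkAll, hadj]
    constructor
    · intro h a ha b hb hab
      exact h a (hperm.mem_iff.mp ha) b (hperm.mem_iff.mp hb) hab
    · intro h a ha b hb hab
      exact h a (hperm.mem_iff.mpr ha) b (hperm.mem_iff.mpr hb) hab
  · rw [if_neg hKA]
    have : ¬ (∀ k ∈ S, k ∈ alphabet) := fun h =>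
      hKA ((pvKeysEq S alphabet hnodS halpha hlen).mp h)
    have hfalse : items.all (fun p => decide (p.1 ∈ PySem.Set.ofList alphabet)) = false := by
      cases hb : items.all (fun p => decide (p.1 ∈ PySem.Set.ofList alphabet))
      · rfl
      · exact absurd (hmemAll.mp hb) this
    rw [hfalse, Bool.false_and]

-- ===== VERDICT (by name: the statement is the Claim_ definition above) =====
theorem isBeautifulString_spec : Claim_equal_isBeautifulString := by
  intro s _
  unfold Spec_isBeautifulString
  exact pvMain s
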